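-- pv_equiv track=rewrite | github.com/Albert-learner/codetree-TILs | 240615/행복한 수열의 개수/number-of-happy-sequence.py | check_consecutive
-- ===== SOURCE A (Python) =====
-- def has_consecutive_numbers(lst):
--     for i in range(len(lst) - 1):
--         if lst[i] == lst[i + 1]:
--             return True
--
--     return False
--
-- def check_consecutive(matrix):
--     row, col = len(matrix), len(matrix[0])
--     happy_sequences = 0
--
--     for i in range(row):
--         if has_consecutive_numbers(matrix[i]):
--             happy_sequences += 1
--
--     for j in range(col):
--         column = [matrix[i][j] for i in range(row)]
--         if has_consecutive_numbers(column):
--             happy_sequences += 1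
--
--     return happy_sequences
-- ===== SOURCE B (Python) =====
-- def check_consecutive(matrix):
--     row, col = len(matrix), len(matrix[0])
--     row_has = [False] * row
--     col_has = [False] * col
--     for i in range(row):
--         r = matrix[i]
--         for j in range(len(r)):
--             if j + 1 < len(r) and r[j] == r[j + 1]:
--                 row_has[i] = True
--             if i + 1 < row and j < col and matrix[i + 1][j] == r[j]:
--                 col_has[j] = True
--     return sum(row_has) + sum(col_has)
-- ===== Notes on version B (the rewrite author's own statement) =====
-- stated objective: alternative
-- what changed: Replaces A's two early-returning passes (a helper scanning each row, then materializing each column as a list and scanning it) by one combined nested scan that maintains boolean flag tables row_has/col_has and returns sum(row_has)+sum(col_has), never building column lists and never early-returning.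
import Mathlib
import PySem

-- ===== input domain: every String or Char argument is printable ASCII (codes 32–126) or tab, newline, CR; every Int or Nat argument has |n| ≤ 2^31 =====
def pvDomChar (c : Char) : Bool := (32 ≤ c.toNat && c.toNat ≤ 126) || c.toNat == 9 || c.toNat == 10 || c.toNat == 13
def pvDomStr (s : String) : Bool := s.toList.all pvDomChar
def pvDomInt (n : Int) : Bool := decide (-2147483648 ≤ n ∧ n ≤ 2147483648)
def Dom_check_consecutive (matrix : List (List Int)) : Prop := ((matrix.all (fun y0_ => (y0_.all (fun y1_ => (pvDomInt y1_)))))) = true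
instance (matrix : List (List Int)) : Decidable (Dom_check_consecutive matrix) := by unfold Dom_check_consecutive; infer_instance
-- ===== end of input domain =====

-- B replaces A's two early-returning passes (helper + materialized column lists) by one combined
-- nested scan maintaining boolean flag tables for rows and columns, summed at the end (objective: alternative).

-- ===== PORT A =====
def pvHcnA (lst : List Int) : Bool :=
  (PySem.List.pyRange 0 ((lst.length : Int) - 1) 1).any
    (fun i => PySem.List.pyGetD lst i 0 == PySem.List.pyGetD lst (i + 1) 0)

def check_consecutive (matrix : List (List Int)) : Int :=
  let row : Int := matrix.length
  let col : Int := (PySem.List.pyGetD matrix 0 []).length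
  let h1 : Int := (PySem.List.pyRange 0 row 1).foldl
    (fun acc i => if pvHcnA (PySem.List.pyGetD matrix i []) then acc + 1 else acc) 0
  (PySem.List.pyRange 0 col 1).foldl
    (fun acc j =>
      let column := (PySem.List.pyRange 0 row 1).map
        (fun i => PySem.List.pyGetD (PySem.List.pyGetD matrix i []) j 0)
      if pvHcnA column then acc + 1 else acc) h1

-- ===== PORT B =====
def check_consecutive_alt (matrix : List (List Int)) : Int :=
  let row := matrix.length
  let col := (matrix.getD 0 []).length
  let flags : List Bool × List Bool :=
    (List.range row).foldl (fun st i =>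
      let r := matrix.getD i []
      (List.range r.length).foldl (fun st j =>
        let st1 := if j + 1 < r.length ∧ r.getD j 0 = r.getD (j + 1) 0
                   then (st.1.set i true, st.2) else st
        if i + 1 < row ∧ j < col ∧ (matrix.getD (i + 1) []).getD j 0 = r.getD j 0
        then (st1.1, st1.2.set j true) else st1) st)
      (List.replicate row false, List.replicate col false)
  (flags.1.count true : Int) + (flags.2.count true : Int)

-- ===== PRECONDITION & SPEC =====
-- Pre_ is exactly where A returns: A raises IndexError on an empty matrix (matrix[0]) and on any
-- matrix with a row shorter than the first row (column comprehension indexes every row at j < col).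
def Pre_check_consecutive (matrix : List (List Int)) : Prop :=
  matrix ≠ [] ∧ ∀ r ∈ matrix, (matrix.getD 0 []).length ≤ r.length
instance (matrix : List (List Int)) : Decidable (Pre_check_consecutive matrix) := by
  unfold Pre_check_consecutive; infer_instance

def pvWitness_check_consecutive : List (List Int) := [[1, 1, 2], [3, 4, 4], [5, 6, 7]]

def Spec_check_consecutive (matrix : List (List Int)) (out : Int) : Prop :=
  out = check_consecutive_alt matrix
instance (matrix : List (List Int)) (out : Int) : Decidable (Spec_check_consecutive matrix out) := by
  unfold Spec_check_consecutive; infer_instance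

-- ===== CLAIM (what is proved, stated in full; the proofs are below) =====
def Claim_equal_check_consecutive : Prop := ∀ (matrix : List (List Int)), Dom_check_consecutive matrix → Pre_check_consecutive matrix → Spec_check_consecutive matrix (check_consecutive matrix)

-- ===== LEMMAS AND PROOFS =====

-- canonical Bool tests (shapes of B's two flag conditions)
def pvRowB (r : List Int) : Bool :=
  (List.range r.length).any (fun j => decide (j + 1 < r.length ∧ r.getD j 0 = r.getD (j + 1) 0))

def pvColB (matrix : List (List Int)) (k : Nat) : Bool :=
  (List.range matrix.length).any (fun i => decide (i + 1 < matrix.length ∧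
    k < (matrix.getD 0 []).length ∧
    (matrix.getD (i + 1) []).getD k 0 = (matrix.getD i []).getD k 0))

-- setting a CONSTANT index under a varying test collapses to one conditional set
theorem pv_foldl_set_const (ids : List Nat) (p : Nat → Prop) [DecidablePred p] (i : Nat)
    (l0 : List Bool) :
    ids.foldl (fun l j => if p j then l.set i true else l) l0
      = if ids.any (fun j => decide (p j)) then l0.set i true else l0 := by
  induction ids generalizing l0 with
  | nil => simp
  | cons a t ih =>
    by_cases hpa : p a <;> simp [hpa, ih, List.set_set]

-- length is preserved by the varying-index set fold
theorem pv_length_setfold (ids : List Nat) (p : Nat → Prop) [DecidablePred p] (l0 : List Bool) :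
    (ids.foldl (fun l j => if p j then l.set j true else l) l0).length = l0.length := by
  induction ids generalizing l0 with
  | nil => rfl
  | cons a t ih => by_cases hpa : p a <;> simp [hpa, ih]

-- elementwise description of the varying-index set fold
theorem pv_getD_setfold (ids : List Nat) (p : Nat → Prop) [DecidablePred p] (l0 : List Bool)
    (h : ∀ j ∈ ids, p j → j < l0.length) (k : Nat) :
    (ids.foldl (fun l j => if p j then l.set j true else l) l0).getD k false
      = (l0.getD k false || ids.any (fun j => decide (j = k) && decide (p j))) := by
  induction ids generalizing l0 with
  | nil => simp
  | cons a t ih =>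
    have ha : p a → a < l0.length := h a (by simp)
    by_cases hpa : p a
    · have halen : a < l0.length := ha hpa
      rw [List.foldl_cons, if_pos hpa, ih _ (by intro j hj hpj; simpa using h j (by simp [hj]) hpj)]
      by_cases hak : a = k
      · subst hak
        simp [hpa, List.getD_eq_getElem?_getD, halen]
      · simp [hpa, hak, List.getD_eq_getElem?_getD, List.getElem?_set_ne (by omega : a ≠ k)]
    · rw [List.foldl_cons, if_neg hpa, ih _ (by intro j hj hpj; exact h j (by simp [hj]) hpj)]
      simp [hpa]

-- the point test inside a range.any
theorem pv_range_any_eq (n k : Nat) (p : Nat → Bool) :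
    (List.range n).any (fun x => decide (x = k) && p x) = (decide (k < n) && p k) := by
  rw [Bool.eq_iff_iff]
  simp only [List.any_eq_true, List.mem_range, Bool.and_eq_true, decide_eq_true_eq]
  constructor
  · rintro ⟨x, hx, rfl, hp⟩; exact ⟨hx, hp⟩
  · rintro ⟨hk, hp⟩; exact ⟨k, hk, rfl, hp⟩

-- A's helper, characterised
theorem pv_hcnA_iff (lst : List Int) :
    pvHcnA lst = true ↔ ∃ m : Nat, m + 1 < lst.length ∧ lst.getD m 0 = lst.getD (m + 1) 0 := by
  unfold pvHcnA
  rw [PySem.List.pyRange_one]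
  simp only [List.any_map, List.any_eq_true, List.mem_range, Function.comp, zero_add, beq_iff_eq]
  have hc : ∀ m : Nat, ((m : Int) + 1) = ((m + 1 : Nat) : Int) := by intro m; push_cast; ring
  constructor
  · rintro ⟨m, hm, he⟩
    rw [hc m, PySem.List.pyGetD_natCast, PySem.List.pyGetD_natCast] at he
    exact ⟨m, by omega, he⟩
  · rintro ⟨m, hm, he⟩
    refine ⟨m, by omega, ?_⟩
    rw [hc m, PySem.List.pyGetD_natCast, PySem.List.pyGetD_natCast]
    exact he

-- A's helper equals B's row test
theorem pv_hcnA_eq_rowB (r : List Int) : pvHcnA r = pvRowB r := by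
  rw [Bool.eq_iff_iff, pv_hcnA_iff]
  unfold pvRowB
  simp only [List.any_eq_true, List.mem_range, decide_eq_true_eq]
  constructor
  · rintro ⟨m, hm, he⟩; exact ⟨m, by omega, hm, he⟩
  · rintro ⟨m, _, hm, he⟩; exact ⟨m, hm, he⟩

-- A's column test equals B's column test (j < col, rows all long enough)
theorem pv_colA_eq_colB (matrix : List (List Int)) (j : Nat)
    (hj : j < (matrix.getD 0 []).length) :
    pvHcnA ((PySem.List.pyRange 0 (matrix.length : Int) 1).map
        (fun i => PySem.List.pyGetD (PySem.List.pyGetD matrix i []) (j : Int) 0))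
      = pvColB matrix j := by
  have hcol : (PySem.List.pyRange 0 (matrix.length : Int) 1).map
      (fun i => PySem.List.pyGetD (PySem.List.pyGetD matrix i []) (j : Int) 0)
      = (List.range matrix.length).map (fun i => (matrix.getD i []).getD j 0) := by
    rw [PySem.List.pyRange_one]
    simp [List.map_map, Function.comp, PySem.List.pyGetD_natCast]
  rw [hcol, Bool.eq_iff_iff, pv_hcnA_iff]
  unfold pvColB
  simp only [List.any_eq_true, List.mem_range, decide_eq_true_eq, List.length_map,
    List.length_range]
  constructor
  · rintro ⟨m, hm, he⟩
    rw [PySem.List.getD_map_range _ _ _ _ (by omega),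
        PySem.List.getD_map_range _ _ _ _ (by omega)] at he
    exact ⟨m, by omega, hm, hj, he.symm⟩
  · rintro ⟨m, _, hm, _, he⟩
    refine ⟨m, hm, ?_⟩
    rw [PySem.List.getD_map_range _ _ _ _ (by omega),
        PySem.List.getD_map_range _ _ _ _ (by omega)]
    exact he.symm

-- B's outer loop body, split into its two independent components
def pvFRow (matrix : List (List Int)) (rh : List Bool) (i : Nat) : List Bool :=
  if pvRowB (matrix.getD i []) then rh.set i true else rh

def pvFCol (matrix : List (List Int)) (ch : List Bool) (i : Nat) : List Bool :=
  (List.range (matrix.getD i []).length).foldl (fun l j =>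
    if i + 1 < matrix.length ∧ j < (matrix.getD 0 []).length ∧
        (matrix.getD (i + 1) []).getD j 0 = (matrix.getD i []).getD j 0
    then l.set j true else l) ch

theorem pv_length_colfold (matrix : List (List Int)) (outer : List Nat) (ch0 : List Bool) :
    (outer.foldl (pvFCol matrix) ch0).length = ch0.length := by
  induction outer generalizing ch0 with
  | nil => rfl
  | cons a t ih => rw [List.foldl_cons, ih]; exact pv_length_setfold _ _ _

theorem pv_getD_colfold (matrix : List (List Int)) (outer : List Nat) (ch0 : List Bool)
    (hlen : (matrix.getD 0 []).length ≤ ch0.length) (k : Nat) :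
    (outer.foldl (pvFCol matrix) ch0).getD k false
      = (ch0.getD k false || outer.any (fun i =>
          (List.range (matrix.getD i []).length).any (fun j => decide (j = k) &&
            decide (i + 1 < matrix.length ∧ j < (matrix.getD 0 []).length ∧
              (matrix.getD (i + 1) []).getD j 0 = (matrix.getD i []).getD j 0)))) := by
  induction outer generalizing ch0 with
  | nil => simp
  | cons a t ih =>
    rw [List.foldl_cons, ih _ (by unfold pvFCol; rw [pv_length_setfold]; exact hlen)]
    have h1 : (pvFCol matrix ch0 a).getD k false
        = (ch0.getD k false || (List.range (matrix.getD a []).length).any (fun j => decide (j = k) &&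
            decide (a + 1 < matrix.length ∧ j < (matrix.getD 0 []).length ∧
              (matrix.getD (a + 1) []).getD j 0 = (matrix.getD a []).getD j 0))) := by
      unfold pvFCol
      exact pv_getD_setfold _ _ _ (by intro j _ hj; omega) k
    rw [h1, List.any_cons, Bool.or_assoc]

theorem pv_ROW_eq (matrix : List (List Int)) :
    (List.range matrix.length).foldl (pvFRow matrix) (List.replicate matrix.length false)
      = (List.range matrix.length).map (fun i => pvRowB (matrix.getD i [])) := by
  have hl : ∀ (ids : List Nat) (l0 : List Bool),
      (ids.foldl (pvFRow matrix) l0).length = l0.length := by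
    intro ids
    induction ids with
    | nil => intro l0; rfl
    | cons a t ih => intro l0; rw [List.foldl_cons, ih]; unfold pvFRow; split <;> simp
  apply List.ext_getElem (by rw [hl]; simp)
  intro k hk1 hk2
  have hk : k < matrix.length := by simpa using hk2
  have hget : ((List.range matrix.length).foldl (pvFRow matrix)
      (List.replicate matrix.length false)).getD k false
      = pvRowB (matrix.getD k []) := by
    have hfr : pvFRow matrix
        = fun (l : List Bool) (j : Nat) => if pvRowB (matrix.getD j []) then l.set j true else l :=
      rfl
    rw [hfr, pv_getD_setfold (List.range matrix.length)
        (fun i => pvRowB (matrix.getD i []) = true) _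
        (by intro j hj _; simpa using hj) k]
    simp [pv_range_any_eq, hk]
  rw [← List.getD_eq_getElem _ false hk1, hget]
  simp

theorem pv_COL_eq (matrix : List (List Int))
    (hlen : ∀ r ∈ matrix, (matrix.getD 0 []).length ≤ r.length) :
    (List.range matrix.length).foldl (pvFCol matrix)
        (List.replicate (matrix.getD 0 []).length false)
      = (List.range (matrix.getD 0 []).length).map (pvColB matrix) := by
  apply List.ext_getElem (by rw [pv_length_colfold]; simp)
  intro k hk1 hk2
  have hk : k < (matrix.getD 0 []).length := by simpa using hk2
  have hget : ((List.range matrix.length).foldl (pvFCol matrix)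
      (List.replicate (matrix.getD 0 []).length false)).getD k false
      = pvColB matrix k := by
    rw [pv_getD_colfold matrix _ _ (by simp) k]
    have h0 : (List.replicate (matrix.getD 0 []).length false).getD k false = false := by
      simp
    rw [h0, Bool.false_or, Bool.eq_iff_iff]
    unfold pvColB
    simp only [List.any_eq_true, List.mem_range, Bool.and_eq_true, decide_eq_true_eq]
    constructor
    · rintro ⟨i, hi, j, hjr, rfl, hcond⟩
      exact ⟨i, hi, hcond⟩
    · rintro ⟨i, hi, hcond⟩
      have hklen : k < (matrix.getD i []).length := by
        have : matrix.getD i [] ∈ matrix := by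
          rw [List.getD_eq_getElem _ _ hi]; exact List.getElem_mem _
        exact lt_of_lt_of_le hk (hlen _ this)
      exact ⟨i, hi, k, hklen, rfl, hcond⟩
  rw [← List.getD_eq_getElem _ false hk1, hget]
  simp

theorem pv_count_true_map (q : Nat → Bool) (l : List Nat) : (l.map q).count true = l.countP q := by
  simp [List.count_eq_countP, List.countP_map, Function.comp_def]

theorem pv_b_eq (matrix : List (List Int)) (hpre : Pre_check_consecutive matrix) :
    check_consecutive_alt matrix
      = (((List.range matrix.length).countP (fun i => pvRowB (matrix.getD i [])) : Int)
        + ((List.range (matrix.getD 0 []).length).countP (pvColB matrix) : Int)) := by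
  simp only [check_consecutive_alt]
  have hbody : (fun (st : List Bool × List Bool) (i : Nat) =>
      List.foldl
                  (fun (st : List Bool × List Bool) (j : Nat) =>
                    if i + 1 < matrix.length ∧ j < (matrix.getD 0 []).length ∧
                        (matrix.getD (i + 1) []).getD j 0 = (matrix.getD i []).getD j 0 then
                      ((if j + 1 < (matrix.getD i []).length ∧
                            (matrix.getD i []).getD j 0 = (matrix.getD i []).getD (j + 1) 0 then
                            (st.1.set i true, st.2)
                          else st).1,
                        (if j + 1 < (matrix.getD i []).length ∧
                              (matrix.getD i []).getD j 0 = (matrix.getD i []).getD (j + 1) 0 then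
                              (st.1.set i true, st.2)
                            else st).2.set j true)
                    else
                      if j + 1 < (matrix.getD i []).length ∧
                          (matrix.getD i []).getD j 0 = (matrix.getD i []).getD (j + 1) 0 then
                        (st.1.set i true, st.2)
                      else st)
                  st (List.range (matrix.getD i []).length))
      = (fun (st : List Bool × List Bool) (i : Nat) =>
          (pvFRow matrix st.1 i, pvFCol matrix st.2 i)) := by
    funext st i
    obtain ⟨rh, ch⟩ := st
    have hstep : (fun (st : List Bool × List Bool) (j : Nat) =>
        if i + 1 < matrix.length ∧ j < (matrix.getD 0 []).length ∧
            (matrix.getD (i + 1) []).getD j 0 = (matrix.getD i []).getD j 0 then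
          ((if j + 1 < (matrix.getD i []).length ∧
                (matrix.getD i []).getD j 0 = (matrix.getD i []).getD (j + 1) 0 then
                (st.1.set i true, st.2)
              else st).1,
            (if j + 1 < (matrix.getD i []).length ∧
                  (matrix.getD i []).getD j 0 = (matrix.getD i []).getD (j + 1) 0 then
                  (st.1.set i true, st.2)
                else st).2.set j true)
        else
          if j + 1 < (matrix.getD i []).length ∧
              (matrix.getD i []).getD j 0 = (matrix.getD i []).getD (j + 1) 0 then
            (st.1.set i true, st.2)
          else st)
        = (fun (st : List Bool × List Bool) (j : Nat) =>
          ((if j + 1 < (matrix.getD i []).length ∧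
              (matrix.getD i []).getD j 0 = (matrix.getD i []).getD (j + 1) 0 then
              st.1.set i true else st.1),
           (if i + 1 < matrix.length ∧ j < (matrix.getD 0 []).length ∧
              (matrix.getD (i + 1) []).getD j 0 = (matrix.getD i []).getD j 0 then
              st.2.set j true else st.2))) := by
      funext st j
      split_ifs <;> rfl
    dsimp only
    rw [hstep, PySem.List.foldl_prod_mk
      (f := fun (a : List Bool) (j : Nat) =>
        if j + 1 < (matrix.getD i []).length ∧
            (matrix.getD i []).getD j 0 = (matrix.getD i []).getD (j + 1) 0 then
          a.set i true else a)
      (g := fun (b : List Bool) (j : Nat) =>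
        if i + 1 < matrix.length ∧ j < (matrix.getD 0 []).length ∧
            (matrix.getD (i + 1) []).getD j 0 = (matrix.getD i []).getD j 0 then
          b.set j true else b)]
    rw [pv_foldl_set_const]
    constructor
  rw [hbody, PySem.List.foldl_prod_mk]
  rw [pv_ROW_eq, pv_COL_eq matrix hpre.2, pv_count_true_map, pv_count_true_map]

theorem pv_a_eq (matrix : List (List Int)) (hpre : Pre_check_consecutive matrix) :
    check_consecutive matrix
      = (((List.range matrix.length).countP (fun i => pvRowB (matrix.getD i [])) : Int)
        + ((List.range (matrix.getD 0 []).length).countP (pvColB matrix) : Int)) := by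
  obtain ⟨hne, hlen⟩ := hpre
  simp only [check_consecutive, PySem.List.pyGetD_zero]
  rw [PySem.List.pyRange_zero_natCast, PySem.List.pyRange_zero_natCast,
      List.foldl_map, List.foldl_map,
      PySem.List.foldl_if_add_one, PySem.List.foldl_if_add_one]
  have hrow : (List.range matrix.length).countP
      (fun (i : Nat) => pvHcnA (PySem.List.pyGetD matrix ((i : Nat) : Int) []))
      = (List.range matrix.length).countP (fun (i : Nat) => pvRowB (matrix.getD i [])) := by
    refine List.countP_congr ?_
    intro i _
    simp [PySem.List.pyGetD_natCast, pv_hcnA_eq_rowB]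
  have hcol : (List.range (matrix.getD 0 []).length).countP
      (fun (j : Nat) => pvHcnA (((List.range matrix.length).map (fun (k : Nat) => (k : Int))).map
        (fun i => PySem.List.pyGetD (PySem.List.pyGetD matrix i []) ((j : Nat) : Int) 0)))
      = (List.range (matrix.getD 0 []).length).countP (pvColB matrix) := by
    refine List.countP_congr ?_
    intro j hj
    rw [List.mem_range] at hj
    rw [← PySem.List.pyRange_zero_natCast]
    rw [pv_colA_eq_colB matrix j hj]
  rw [hrow, hcol]
  ring

-- ===== VERDICT (by name: the statement is the Claim_ definition above) =====
theorem check_consecutive_spec : Claim_equal_check_consecutive := by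
  intro matrix _ hpre
  unfold Spec_check_consecutive
  rw [pv_a_eq matrix hpre, pv_b_eq matrix hpre]
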